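-- pv_equiv track=rewrite | github.com/philpreikschas/operando-ir | operando_ir/core.py | peak_shifts
-- ===== SOURCE A (Python) =====
-- def peak_shifts(local_maxima_dict):
--     # Create an empty dictionary to hold the peak shifts
--     peak_shift_dict = {}
--
--     # Iterate over all peaks in the local maxima dictionary
--     for peak in set(peak for sublist in local_maxima_dict.values() for peak in sublist.keys()):
--         # Create an empty list to hold the peak shifts for this peak
--         peak_shifts = []
--
--         reference_position = None  # Initialize the reference position as None
--
--         # Iterate over all spectra
--         for spectrum_number, spectrum_peaks in local_maxima_dict.items():
--             # Check if the peak exists in the inner dictionary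
--             if peak in spectrum_peaks:
--                 # Use the first available peak position as the reference position
--                 if reference_position is None:
--                     reference_position = spectrum_peaks[peak][0]
--
--                 # Calculate the peak shift for this spectrum
--                 peak_position = spectrum_peaks[peak][0]
--                 peak_shift = peak_position - reference_position
--
--                 # Add the peak shift to the list
--                 peak_shifts.append(peak_shift)
--
--         # Add the list of peak shifts for this peak to the dictionary
--         peak_shift_dict[peak] = peak_shifts
--
--     return peak_shift_dict
-- ===== SOURCE B (Python) =====
-- def peak_shifts(local_maxima_dict):
--     # One pass over all spectra: group first positions per peak, then compute
--     # shifts relative to each peak's first-seen position.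
--     positions = {}
--     for spectrum_peaks in local_maxima_dict.values():
--         for peak, pos_list in spectrum_peaks.items():
--             positions.setdefault(peak, []).append(pos_list[0])
--     return {peak: [p - plist[0] for p in plist]
--             for peak, plist in positions.items()}
-- ===== Notes on version B (the rewrite author's own statement) =====
-- stated objective: faster
-- what changed: Instead of iterating the full spectra dict once per distinct peak (rescanning all spectra for each peak), B makes a single pass over all spectra grouping each peak's first position into a dict, then maps each group to shifts relative to its first entry.
import Mathlib
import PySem

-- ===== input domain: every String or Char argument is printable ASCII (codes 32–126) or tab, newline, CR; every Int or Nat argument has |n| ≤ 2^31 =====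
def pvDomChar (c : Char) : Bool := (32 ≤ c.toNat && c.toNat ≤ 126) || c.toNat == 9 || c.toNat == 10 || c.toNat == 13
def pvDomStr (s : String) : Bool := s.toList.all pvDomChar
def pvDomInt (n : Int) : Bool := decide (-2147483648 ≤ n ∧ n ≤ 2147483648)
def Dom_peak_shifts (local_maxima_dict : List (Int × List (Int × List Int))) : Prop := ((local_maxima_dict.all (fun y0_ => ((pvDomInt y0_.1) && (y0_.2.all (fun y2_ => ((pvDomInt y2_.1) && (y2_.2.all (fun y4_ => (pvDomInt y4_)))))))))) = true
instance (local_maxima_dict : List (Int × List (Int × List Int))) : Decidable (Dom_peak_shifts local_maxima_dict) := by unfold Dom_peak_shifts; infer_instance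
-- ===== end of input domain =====

-- B replaces A's per-peak rescans of all spectra (O(P·S)) by ONE pass over all spectra that
-- groups each peak's first positions, then maps to shifts; return-value equivalence only
-- (neither version mutates its argument).

-- ===== PORT A =====
-- inner loop of A (the 'for spectrum_number, spectrum_peaks in local_maxima_dict.items()' body),
-- state = (reference_position, peak_shifts list)
def pvStepA (peak : Int) (st : Option Int × List Int) (sp : Int × List (Int × List Int)) :
    Option Int × List Int :=
  match (PySem.Dict.mk sp.2).get? peak with
  | none => st
  | some pl =>
    let ref := match st.1 with
      | none => pl.headI      -- spectrum_peaks[peak][0]; Pre_ guarantees the list is nonempty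
      | some r => r
    (some ref, st.2 ++ [pl.headI - ref])

def pvScanA (peak : Int) (local_maxima_dict : List (Int × List (Int × List Int))) :
    Option Int × List Int :=
  local_maxima_dict.foldl (pvStepA peak) (none, [])

def peak_shifts (local_maxima_dict : List (Int × List (Int × List Int))) : List (Int × List Int) :=
  -- set(peak for sublist in local_maxima_dict.values() for peak in sublist.keys())
  let allPeaks : List Int :=
    PySem.Set.ofList (local_maxima_dict.flatMap (fun sp => sp.2.map (fun q => q.1)))
  (allPeaks.foldl
      (fun out peak => out.insert peak (pvScanA peak local_maxima_dict).2)
      (PySem.Dict.empty : PySem.Dict Int (List Int))).items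

-- ===== PORT B =====
def peak_shifts_alt (local_maxima_dict : List (Int × List (Int × List Int))) : List (Int × List Int) :=
  let positions : PySem.Dict Int (List Int) :=
    local_maxima_dict.foldl
      (fun acc sp =>
        sp.2.foldl (fun acc q => acc.modify q.1 [] (fun l => l ++ [q.2.headI])) acc)
      PySem.Dict.empty
  positions.items.map (fun kv => (kv.1, kv.2.map (fun p => p - kv.2.headI)))

-- ===== PRECONDITION & SPEC =====
-- Pre_ excludes (a) assoc lists with duplicate outer or inner keys, which do not represent a
-- Python dict (dict construction collapses them), and (b) inputs with an empty peak-position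
-- list, on which A raises IndexError at spectrum_peaks[peak][0] (B raises there too).
def Pre_peak_shifts (local_maxima_dict : List (Int × List (Int × List Int))) : Prop :=
  (local_maxima_dict.map Prod.fst).Nodup ∧
    ∀ sp ∈ local_maxima_dict, (sp.2.map Prod.fst).Nodup ∧ ∀ q ∈ sp.2, q.2 ≠ []

instance (local_maxima_dict : List (Int × List (Int × List Int))) : Decidable (Pre_peak_shifts local_maxima_dict) := by unfold Pre_peak_shifts; infer_instance

def pvWitness_peak_shifts : (List (Int × List (Int × List Int))) :=
  [(1, [(100, [5]), (200, [7])]), (2, [(100, [6])]), (3, [])]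

def Spec_peak_shifts (local_maxima_dict : List (Int × List (Int × List Int))) (out : List (Int × List Int)) : Prop := out = peak_shifts_alt local_maxima_dict
instance (local_maxima_dict : List (Int × List (Int × List Int))) (out : List (Int × List Int)) : Decidable (Spec_peak_shifts local_maxima_dict out) := by unfold Spec_peak_shifts; infer_instance

-- ===== CLAIM (what is proved, stated in full; the proofs are below) =====
def Claim_equal_peak_shifts : Prop := ∀ (local_maxima_dict : List (Int × List (Int × List Int))), Dom_peak_shifts local_maxima_dict → Pre_peak_shifts local_maxima_dict → Spec_peak_shifts local_maxima_dict (peak_shifts local_maxima_dict)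

-- ===== LEMMAS AND PROOFS =====

-- first positions of `p` across all spectra, in spectra order
def pvPosns (p : Int) (d : List (Int × List (Int × List Int))) : List Int :=
  ((d.flatMap (fun sp => sp.2)).filter (fun q => q.1 == p)).map (fun q => q.2.headI)

theorem pvPosns_cons (p : Int) (sp : Int × List (Int × List Int))
    (d : List (Int × List (Int × List Int))) :
    pvPosns p (sp :: d) =
      (sp.2.filter (fun q => q.1 == p)).map (fun q => q.2.headI) ++ pvPosns p d := by
  simp [pvPosns, List.flatMap_cons, List.filter_append]

-- on a duplicate-free assoc list, filtering by a key is what dict lookup finds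
theorem pvFilter_eq_get? (l : List (Int × List Int)) (p : Int)
    (hn : (l.map Prod.fst).Nodup) :
    l.filter (fun q => q.1 == p) =
      ((PySem.Dict.mk l).get? p).elim [] (fun pl => [(p, pl)]) := by
  induction l with
  | nil => simp [PySem.Dict.get?]
  | cons q t ih =>
    rw [List.map_cons] at hn
    have hn' := List.nodup_cons.mp hn
    rw [List.filter_cons, PySem.Dict.get?_mk_cons]
    by_cases h : q.1 = p
    · subst h
      have ht : t.filter (fun q' => q'.1 == q.1) = [] := by
        refine List.filter_eq_nil_iff.mpr ?_
        intro a ha hb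
        exact hn'.1 (List.mem_map.mpr ⟨a, ha, by simpa using hb⟩)
      simp [ht]
    · simp only [beq_iff_eq, h]
      rw [ih hn'.2]
      simp

theorem pvScanA_some (p : Int) (d : List (Int × List (Int × List Int))) (r : Int)
    (acc : List Int) (hn : ∀ sp ∈ d, (sp.2.map Prod.fst).Nodup) :
    d.foldl (pvStepA p) (some r, acc) =
      (some r, acc ++ (pvPosns p d).map (fun x => x - r)) := by
  induction d generalizing acc with
  | nil => simp [pvPosns]
  | cons sp t ih =>
    have hsp := hn sp (by simp)
    have ht : ∀ s ∈ t, (s.2.map Prod.fst).Nodup := fun s hs => hn s (by simp [hs])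
    rw [List.foldl_cons, pvPosns_cons, pvFilter_eq_get? _ _ hsp]
    cases hg : (PySem.Dict.mk sp.2).get? p with
    | none => simp [pvStepA, hg, ih _ ht]
    | some pl => simp [pvStepA, hg, ih _ ht]

theorem pvScanA_eq (p : Int) (d : List (Int × List (Int × List Int)))
    (hn : ∀ sp ∈ d, (sp.2.map Prod.fst).Nodup) :
    pvScanA p d =
      match pvPosns p d with
      | [] => (none, [])
      | r :: t => (some r, (r :: t).map (fun x => x - r)) := by
  induction d with
  | nil => simp [pvScanA, pvPosns]
  | cons sp t ih =>
    have hsp := hn sp (by simp)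
    have ht : ∀ s ∈ t, (s.2.map Prod.fst).Nodup := fun s hs => hn s (by simp [hs])
    rw [pvScanA, List.foldl_cons, pvPosns_cons, pvFilter_eq_get? _ _ hsp]
    cases hg : (PySem.Dict.mk sp.2).get? p with
    | none => simpa [pvStepA, hg, pvScanA] using ih ht
    | some pl =>
      simp only [pvStepA, hg, Option.elim, List.map_cons, List.nil_append]
      rw [pvScanA_some p t pl.headI [pl.headI - pl.headI] ht]
      simp

-- A in normal form: the peak set, each peak paired with its scan result
theorem pvA_normal (d : List (Int × List (Int × List Int))) :
    peak_shifts d =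
      (PySem.Set.ofList ((d.flatMap (fun sp => sp.2)).map Prod.fst)).map
        (fun p => (p, (pvScanA p d).2)) := by
  simp only [peak_shifts, List.map_flatMap]
  have h := PySem.Dict.items_foldl_insert_fresh
    (PySem.Set.ofList (d.flatMap (fun sp => sp.2.map Prod.fst)))
    (fun p : Int => p) (fun p => (pvScanA p d).2) PySem.Dict.empty
    (fun a _ => PySem.Dict.contains_empty a)
    (by simp [PySem.Set.nodup_ofList])
  simp at h
  exact h

-- B in normal form: the same peak set, each peak paired with its grouped-positions shifts
theorem pvB_normal (d : List (Int × List (Int × List Int))) :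
    peak_shifts_alt d =
      (PySem.Set.ofList ((d.flatMap (fun sp => sp.2)).map Prod.fst)).map
        (fun p => (p, (pvPosns p d).map (fun x => x - (pvPosns p d).headI))) := by
  simp only [peak_shifts_alt]
  rw [← List.foldl_flatMap]
  rw [show ((d.flatMap (fun sp => sp.2)).foldl
        (fun acc q => acc.modify q.1 [] (fun l => l ++ [q.2.headI])) PySem.Dict.empty) =
      (((d.flatMap (fun sp => sp.2)).map (fun q => (q.1, q.2.headI))).foldl
        (fun acc q => acc.modify q.1 [] (fun l => l ++ [q.2])) PySem.Dict.empty) from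
    Eq.symm List.foldl_map]
  set flat := d.flatMap (fun sp => sp.2) with hflat
  set flat' := flat.map (fun q => (q.1, q.2.headI)) with hflat'
  have hnd : (flat'.foldl (fun acc q => acc.modify q.1 [] (fun l => l ++ [q.2]))
      PySem.Dict.empty).keys.Nodup := by
    exact PySem.Dict.nodup_keys_foldl_modify_key flat' Prod.fst [] (fun _ q => fun l => l ++ [q.2])
      PySem.Dict.empty (by simp)
  rw [PySem.Dict.items_eq_map_keys _ hnd []]
  have hkeys : (flat'.foldl (fun acc q => acc.modify q.1 [] (fun l => l ++ [q.2]))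
      PySem.Dict.empty).keys = PySem.Set.ofList (flat.map Prod.fst) := by
    rw [PySem.Dict.keys_foldl_modify_key]
    have : flat'.map Prod.fst = flat.map Prod.fst := by
      simp [hflat', List.map_map, Function.comp_def]
    rw [this]
    exact PySem.Set.update_empty _
  rw [hkeys, List.map_map]
  refine List.map_congr_left (fun p hp => ?_)
  have hgd : ∀ c, (flat'.foldl (fun acc q => acc.modify q.1 [] (fun l => l ++ [q.2]))
      PySem.Dict.empty).getD c [] = pvPosns c d := by
    intro c
    rw [PySem.Dict.getD_foldl_modify_append]
    simp [hflat', List.filter_map, pvPosns, Function.comp_def, ← hflat, List.map_map]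
  simp [hgd]

theorem pvPosns_ne_nil (p : Int) (d : List (Int × List (Int × List Int)))
    (hp : p ∈ (d.flatMap (fun sp => sp.2)).map Prod.fst) : pvPosns p d ≠ [] := by
  intro h
  obtain ⟨q, hq, hfst⟩ := List.mem_map.mp hp
  have hqf : q ∈ (d.flatMap (fun sp => sp.2)).filter (fun q => q.1 == p) :=
    List.mem_filter.mpr ⟨hq, by simp [hfst]⟩
  have hm : q.2.headI ∈ pvPosns p d := List.mem_map_of_mem hqf
  rw [h] at hm
  exact List.not_mem_nil hm

-- ===== VERDICT (by name: the statement is the Claim_ definition above) =====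
theorem peak_shifts_spec : Claim_equal_peak_shifts := by
  intro d _ hpre
  unfold Spec_peak_shifts
  rw [pvA_normal, pvB_normal]
  refine List.map_congr_left (fun p hp => ?_)
  have hmem : p ∈ (d.flatMap (fun sp => sp.2)).map Prod.fst :=
    (PySem.List.mem_dedup _ _).mp hp
  have hn : ∀ sp ∈ d, (sp.2.map Prod.fst).Nodup := fun sp hsp => (hpre.2 sp hsp).1
  rw [pvScanA_eq p d hn]
  cases hps : pvPosns p d with
  | nil => exact absurd hps (pvPosns_ne_nil p d hmem)
  | cons r t => simp
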